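-- pv_equiv track=rewrite | github.com/MCV-2025-C1-Project/Team8 | descriptors/texture_descriptors.py | _uniform_pattern_fast
-- ===== SOURCE A (Python) =====
-- def _uniform_pattern_fast(lbp_value: int, n_neighbors: int) -> int:
--     """
--     Fast uniform pattern conversion using bit operations.
--     A uniform pattern is one that has at most 2 transitions between 0 and 1.
--     """
--     # Count transitions using bit operations (much faster than string operations)
--     transitions = 0
--     for i in range(n_neighbors):
--         current_bit = (lbp_value >> (n_neighbors - 1 - i)) & 1
--         next_bit = (lbp_value >> (n_neighbors - 1 - ((i + 1) % n_neighbors))) & 1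
--         if current_bit != next_bit:
--             transitions += 1
--
--     # If more than 2 transitions, it's non-uniform
--     if transitions > 2:
--         return n_neighbors + 1  # Non-uniform pattern bin
--     else:
--         return lbp_value
-- ===== SOURCE B (Python) =====
-- def _uniform_pattern_fast(lbp_value: int, n_neighbors: int) -> int:
--     """
--     Fast uniform pattern conversion using bit operations.
--     A uniform pattern is one that has at most 2 transitions between 0 and 1.
--     """
--     if n_neighbors <= 0:
--         return lbp_value
--     # Keep only the n_neighbors bits the circular pattern consists of.
--     x = lbp_value % (1 << n_neighbors)
--     # One-step circular rotation of those bits; XOR marks every position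
--     # where circularly adjacent bits differ, so its popcount is the number
--     # of 0/1 transitions around the ring.
--     rotated = (x >> 1) | ((x & 1) << (n_neighbors - 1))
--     transitions = bin(x ^ rotated).count("1")
--     return n_neighbors + 1 if transitions > 2 else lbp_value
-- ===== Notes on version B (the rewrite author's own statement) =====
-- stated objective: faster
-- what changed: Replaces the per-bit loop (two shifts and a modular index per neighbor) by three whole-word bit operations: mask to n_neighbors bits, XOR with the one-step circular rotation, and a single popcount of the XOR.
import Mathlib
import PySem

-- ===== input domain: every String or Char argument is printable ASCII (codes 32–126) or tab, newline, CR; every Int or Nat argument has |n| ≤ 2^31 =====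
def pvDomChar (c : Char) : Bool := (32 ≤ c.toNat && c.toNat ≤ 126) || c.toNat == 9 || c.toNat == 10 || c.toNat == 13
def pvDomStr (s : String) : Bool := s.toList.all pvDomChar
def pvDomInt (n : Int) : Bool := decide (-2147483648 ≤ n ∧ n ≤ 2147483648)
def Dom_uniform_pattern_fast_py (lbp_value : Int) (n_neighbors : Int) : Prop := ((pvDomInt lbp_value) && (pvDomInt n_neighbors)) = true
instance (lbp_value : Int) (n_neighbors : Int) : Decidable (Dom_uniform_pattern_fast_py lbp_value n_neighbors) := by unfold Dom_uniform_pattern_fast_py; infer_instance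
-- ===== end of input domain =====

-- B replaces A's per-neighbor transition loop by mask / rotate / XOR / popcount
-- (a constant number of whole-word bit operations); same return value, proved below.

-- ===== PORT A =====
-- Literal port of A: the loop over range(n_neighbors) accumulates `transitions`.
-- Python `>>` is Lean's `>>>` on Int with a Nat count; the shift counts n-1-i and
-- n-1-((i+1)%n) are nonnegative for every i produced by range(n_neighbors), so
-- `.toNat` is exact there; `x & 1` is PySem.Int.band x 1; `%` is PySem.Int.mod.
def uniform_pattern_fast_py (lbp_value : Int) (n_neighbors : Int) : Int :=
  let transitions : Int := (PySem.List.pyRange 0 n_neighbors 1).foldl (fun t i =>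
    let current_bit := PySem.Int.band (lbp_value >>> (n_neighbors - 1 - i).toNat) 1
    let next_bit := PySem.Int.band
      (lbp_value >>> (n_neighbors - 1 - PySem.Int.mod (i + 1) n_neighbors).toNat) 1
    if current_bit ≠ next_bit then t + 1 else t) 0
  if transitions > 2 then n_neighbors + 1 else lbp_value

-- ===== PORT B =====
-- Literal port of Source B: for n_neighbors > 0 the shift counts n_neighbors and
-- n_neighbors-1 are nonnegative (`.toNat` exact), `%` of the positive modulus
-- 1 << n_neighbors is PySem.Int.mod, and `&`/`|`/`^` are PySem.Int.band/bor/bxor;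
-- bin(y).count("1") on the nonnegative y = x ^ rotated is PySem.Int.bitCount.
def uniform_pattern_fast_py_alt (lbp_value : Int) (n_neighbors : Int) : Int :=
  if n_neighbors ≤ 0 then lbp_value
  else
    let x := PySem.Int.mod lbp_value ((1:Int) <<< n_neighbors.toNat)
    let rotated := PySem.Int.bor (x >>> (1:Nat))
      ((PySem.Int.band x 1) <<< (n_neighbors - 1).toNat)
    let transitions : Int := (PySem.Int.bitCount (PySem.Int.bxor x rotated) : Int)
    if transitions > 2 then n_neighbors + 1 else lbp_value

-- ===== PRECONDITION & SPEC =====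
def Spec_uniform_pattern_fast_py (lbp_value : Int) (n_neighbors : Int) (out : Int) : Prop := out = uniform_pattern_fast_py_alt lbp_value n_neighbors
instance (lbp_value : Int) (n_neighbors : Int) (out : Int) : Decidable (Spec_uniform_pattern_fast_py lbp_value n_neighbors out) := by unfold Spec_uniform_pattern_fast_py; infer_instance

-- ===== CLAIM (what is proved, stated in full; the proofs are below) =====
def Claim_equal_uniform_pattern_fast_py : Prop := ∀ (lbp_value : Int) (n_neighbors : Int), Dom_uniform_pattern_fast_py lbp_value n_neighbors → Spec_uniform_pattern_fast_py lbp_value n_neighbors (uniform_pattern_fast_py lbp_value n_neighbors)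

-- ===== LEMMAS AND PROOFS =====

-- `(a >> k) & 1` only depends on `a % 2^N` when k < N: it is bit k of the masked value.
theorem pvBit (a : Int) (N k : Nat) (hk : k < N) :
    PySem.Int.band (a >>> k) 1
      = (if (a % ((2:Int) ^ N)).toNat.testBit k then (1:Int) else 0) := by
  rw [PySem.Int.band_one, PySem.Int.mod_eq_emod_of_pos (by norm_num), Int.shiftRight_eq_div_pow]
  have hr0 : 0 ≤ a % ((2:Int) ^ N) := Int.emod_nonneg a (by positivity)
  have key : a / ((2:Nat) ^ k : Nat) % 2 = a % ((2:Int)^N) / ((2:Nat)^k : Nat) % 2 := by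
    have h := Int.mul_ediv_add_emod a ((2:Int)^N)
    have hpow : (((2:Nat)^k : Nat) : Int) * (2^(N-k) * (a / 2^N)) = 2^N * (a / 2^N) := by
      push_cast
      rw [← mul_assoc, ← pow_add]
      congr 2
      omega
    have hq : a = a % ((2:Int)^N) + ((2:Nat)^k : Nat) * (2^(N-k) * (a / 2^N)) := by
      rw [hpow]; linarith
    conv_lhs => rw [hq]
    rw [Int.add_mul_ediv_left _ _ (by positivity : (((2:Nat)^k : Nat) : Int) ≠ 0)]
    have hsplit : (2:Int)^(N-k) * (a/2^N) = 2 * (2^(N-k-1) * (a/2^N)) := by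
      rw [← mul_assoc]
      congr 1
      rw [← pow_succ']
      congr 1
      omega
    rw [hsplit, Int.add_mul_emod_self_left]
  rw [key]
  obtain ⟨m, hm⟩ : ∃ m : Nat, a % ((2:Int)^N) = (m : Int) :=
    ⟨_, (Int.toNat_of_nonneg hr0).symm⟩
  rw [hm]
  simp only [Int.toNat_natCast]
  have hc : ((m : Int)) / (((2:Nat)^k : Nat) : Int) % 2 = ((m / 2^k % 2 : Nat) : Int) := by
    push_cast; ring
  rw [hc]
  rcases Nat.mod_two_eq_zero_or_one (m / 2^k) with h | h <;>
    simp [Nat.testBit_eq_decide_div_mod_eq, h]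

-- popcount of m < 2^k is the number of set bits among positions 0..k-1.
theorem pvPc : ∀ (k m : Nat), m < 2 ^ k →
    PySem.Int.bitCount (m : Int) = (List.range k).countP (fun j => m.testBit j) := by
  intro k
  induction k with
  | zero =>
    intro m hm
    interval_cases m
    simp [PySem.Int.bitCount_zero]
  | succ k ih =>
    intro m hm
    by_cases h0 : m = 0
    · subst h0
      simp [PySem.Int.bitCount_zero, Nat.zero_testBit]
    · rw [PySem.Int.bitCount_natCast (Nat.pos_of_ne_zero h0)]
      rw [ih (m / 2) (by omega)]
      rw [List.range_succ_eq_map, List.countP_cons, List.countP_map]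
      have hcomp : ((fun j => m.testBit j) ∘ Nat.succ) = (fun j => (m / 2).testBit j) := by
        funext j
        simp [Function.comp, Nat.testBit_succ]
      rw [hcomp]
      rcases Nat.mod_two_eq_zero_or_one m with h | h <;>
        simp [Nat.testBit_zero, h] <;> omega

-- Bit j of `x XOR (its 1-step circular rotation)` marks a transition at position j.
theorem pvRot (x N j : Nat) (hx : x < 2 ^ N) (hN : 0 < N) (hj : j < N) :
    (x ^^^ ((x >>> 1) ||| ((x &&& 1) <<< (N - 1)))).testBit j
      = (x.testBit j != x.testBit ((j + 1) % N)) := by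
  rw [Nat.testBit_xor, Nat.testBit_or, Nat.testBit_shiftRight, Nat.testBit_shiftLeft,
    Nat.testBit_and]
  by_cases hlast : j = N - 1
  · subst hlast
    have h1 : x.testBit (1 + (N - 1)) = false := by
      apply Nat.testBit_lt_two_pow
      calc x < 2 ^ N := hx
        _ ≤ 2 ^ (1 + (N - 1)) := by apply Nat.pow_le_pow_right <;> omega
    have h2 : (N - 1 + 1) % N = 0 := by
      have h : N - 1 + 1 = N := by omega
      rw [h, Nat.mod_self]
    rw [h1, h2]
    simp [Nat.testBit_zero]
  · have h2 : (j + 1) % N = j + 1 := Nat.mod_eq_of_lt (by omega)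
    have h3 : (decide (j ≥ N - 1)) = false := by simp; omega
    rw [h2, h3]
    simp [show 1 + j = j + 1 by omega]

-- countP over range as a Finset indicator sum, and the reindexing i ↦ N-2-i
-- (N-1 ↦ N-1) identifying A's MSB-first transition count with B's LSB-first one.
theorem pvCountSum (p : Nat → Bool) : ∀ (N : Nat),
    (List.range N).countP p = ∑ i ∈ Finset.range N, (if p i then 1 else 0) := by
  intro N
  induction N with
  | zero => simp
  | succ N ih =>
    rw [List.range_succ, List.countP_append, Finset.sum_range_succ, ih]
    simp [List.countP_cons]

theorem pvReindex (t : Nat → Bool) (N : Nat) (hN : 0 < N) :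
    (List.range N).countP (fun i => t (N - 1 - i) != t (N - 1 - (i + 1) % N))
      = (List.range N).countP (fun j => t j != t ((j + 1) % N)) := by
  rw [pvCountSum, pvCountSum]
  have hbne : ∀ x y : Bool, (x != y) = (y != x) := by decide
  refine Finset.sum_nbij' (fun i => if i = N - 1 then N - 1 else N - 2 - i)
    (fun i => if i = N - 1 then N - 1 else N - 2 - i) ?_ ?_ ?_ ?_ ?_
  · intro a ha
    simp only [Finset.mem_range] at *
    split_ifs <;> omega
  · intro a ha
    simp only [Finset.mem_range] at *
    split_ifs <;> omega
  · intro a ha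
    simp only [Finset.mem_range] at ha
    by_cases h : a = N - 1
    · simp [h]
    · have hN2 : 2 ≤ N := by omega
      have h1 : ¬ (N - 2 - a = N - 1) := by omega
      simp only [if_neg h, if_neg h1]
      omega
  · intro a ha
    simp only [Finset.mem_range] at ha
    by_cases h : a = N - 1
    · simp [h]
    · have hN2 : 2 ≤ N := by omega
      have h1 : ¬ (N - 2 - a = N - 1) := by omega
      simp only [if_neg h, if_neg h1]
      omega
  · intro a ha
    simp only [Finset.mem_range] at ha
    beta_reduce
    by_cases h : a = N - 1
    · subst h
      rw [if_pos rfl]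
      have e1 : (N - 1 + 1) % N = 0 := by
        have e : N - 1 + 1 = N := by omega
        rw [e, Nat.mod_self]
      rw [e1, Nat.sub_self, Nat.sub_zero, hbne]
    · rw [if_neg h]
      have hN2 : 2 ≤ N := by omega
      have e1 : (a + 1) % N = a + 1 := Nat.mod_eq_of_lt (by omega)
      have e2 : N - 1 - (a + 1) = N - 2 - a := by omega
      have e3 : (N - 2 - a + 1) % N = N - 1 - a := by
        rw [Nat.mod_eq_of_lt (by omega)]
        omega
      rw [e1, e2, e3, hbne]

-- A and B return the same value on every input.
theorem pvMain (lbp_value : Int) (n_neighbors : Int) :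
    uniform_pattern_fast_py lbp_value n_neighbors
      = uniform_pattern_fast_py_alt lbp_value n_neighbors := by
  by_cases hn : n_neighbors ≤ 0
  · have he : PySem.List.pyRange 0 n_neighbors 1 = [] := by
      simp [PySem.List.pyRange]; omega
    unfold uniform_pattern_fast_py uniform_pattern_fast_py_alt
    rw [he, if_pos hn]
    norm_num
  · rw [not_le] at hn
    lift n_neighbors to ℕ using hn.le with N hNn
    have hN1 : 1 ≤ N := by exact_mod_cast hn
    have h2N : (0:Int) < 2 ^ N := by positivity
    set xN : Nat := (lbp_value % ((2:Int) ^ N)).toNat with hxdef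
    have hxcast : lbp_value % ((2:Int) ^ N) = (xN : Int) :=
      (Int.toNat_of_nonneg (Int.emod_nonneg _ (by positivity))).symm
    have hxN : xN < 2 ^ N := by
      have h1 := Int.emod_lt_of_pos lbp_value h2N
      rw [hxcast] at h1
      exact_mod_cast h1
    set t : Nat → Bool := fun j => xN.testBit j with htdef
    -- ===== A side =====
    unfold uniform_pattern_fast_py
    rw [PySem.List.pyRange_zero_natCast]
    have hstep : (fun (tr : Int) (i : Int) =>
        let current_bit := PySem.Int.band (lbp_value >>> ((N:Int) - 1 - i).toNat) 1
        let next_bit := PySem.Int.band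
          (lbp_value >>> ((N:Int) - 1 - PySem.Int.mod (i + 1) (N:Int)).toNat) 1
        if current_bit ≠ next_bit then tr + 1 else tr)
      = (fun tr i => if (decide (PySem.Int.band (lbp_value >>> ((N:Int) - 1 - i).toNat) 1
          ≠ PySem.Int.band (lbp_value >>> ((N:Int) - 1 - PySem.Int.mod (i + 1) (N:Int)).toNat) 1)) = true
          then tr + 1 else tr) := by
      funext tr i
      by_cases h : PySem.Int.band (lbp_value >>> ((N:Int) - 1 - i).toNat) 1
          = PySem.Int.band (lbp_value >>> ((N:Int) - 1 - PySem.Int.mod (i + 1) (N:Int)).toNat) 1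
      · simp [h]
      · simp [h]
    rw [hstep, PySem.List.foldl_count_if, List.countP_map]
    have hAcount : List.countP ((fun i => decide (PySem.Int.band (lbp_value >>> ((N:Int) - 1 - i).toNat) 1
          ≠ PySem.Int.band (lbp_value >>> ((N:Int) - 1 - PySem.Int.mod (i + 1) (N:Int)).toNat) 1)) ∘ (fun k : Nat => (k:Int)))
        (List.range N)
        = List.countP (fun i => t (N - 1 - i) != t (N - 1 - (i + 1) % N)) (List.range N) := by
      apply List.countP_congr
      intro i hi
      rw [List.mem_range] at hi
      simp only [Function.comp]
      have e1 : ((N:Int) - 1 - (i:Int)).toNat = N - 1 - i := by omega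
      have hmlt : (i + 1) % N < N := Nat.mod_lt _ (by omega)
      have e2 : PySem.Int.mod ((i:Int) + 1) (N:Int) = (((i + 1) % N : Nat) : Int) := by
        rw [PySem.Int.mod_eq_emod_of_pos (by exact_mod_cast hn)]
        push_cast
        ring
      have e3 : ((N:Int) - 1 - (((i + 1) % N : Nat) : Int)).toNat = N - 1 - (i + 1) % N := by
        omega
      rw [e1, e2, e3, pvBit lbp_value N (N - 1 - i) (by omega),
        pvBit lbp_value N (N - 1 - (i + 1) % N) (by omega), ← hxdef]
      rcases h1 : xN.testBit (N - 1 - i) <;>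
        rcases h2 : xN.testBit (N - 1 - (i + 1) % N) <;>
        simp [htdef, h1, h2]
    rw [hAcount]
    -- ===== B side =====
    have eN : ((N:Int)).toNat = N := Int.toNat_natCast N
    have eSL : ((1:Int) <<< N) = ((2 ^ N : Nat) : Int) := by
      rw [Int.shiftLeft_eq]
      push_cast
      ring
    have em : PySem.Int.mod lbp_value (((2 ^ N : Nat) : Nat) : Int) = (xN : Int) := by
      rw [PySem.Int.mod_eq_emod_of_pos (by exact_mod_cast h2N)]
      rw [show (((2 ^ N : Nat) : Nat) : Int) = (2:Int) ^ N by push_cast; ring]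
      exact hxcast
    have eSR : ((xN : Int) >>> (1:Nat)) = ((xN >>> 1 : Nat) : Int) := by
      rw [Int.shiftRight_eq_div_pow]
      push_cast [Nat.shiftRight_eq_div_pow]
      ring
    have eB1 : PySem.Int.band (xN : Int) 1 = ((xN &&& 1 : Nat) : Int) := by
      rw [show (1:Int) = ((1:Nat) : Int) from rfl, PySem.Int.band_natCast]
    have eN1 : ((N:Int) - 1).toNat = N - 1 := by omega
    have eSL2 : (((xN &&& 1 : Nat) : Int) <<< (N - 1)) = (((xN &&& 1) <<< (N - 1) : Nat) : Int) := by
      rw [Int.shiftLeft_eq]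
      push_cast [Nat.shiftLeft_eq]
      ring
    have hrotlt : ((xN >>> 1) ||| ((xN &&& 1) <<< (N - 1))) < 2 ^ N := by
      apply Nat.or_lt_two_pow
      · calc xN >>> 1 ≤ xN := by
              rw [Nat.shiftRight_eq_div_pow]
              exact Nat.div_le_self _ _
          _ < 2 ^ N := hxN
      · calc (xN &&& 1) <<< (N - 1) ≤ 1 <<< (N - 1) := by
              rw [Nat.shiftLeft_eq, Nat.shiftLeft_eq]
              exact Nat.mul_le_mul_right _ Nat.and_le_right
          _ < 2 ^ N := by
              rw [Nat.shiftLeft_eq, one_mul]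
              exact Nat.pow_lt_pow_right (by omega) (by omega)
    have hylt : (xN ^^^ ((xN >>> 1) ||| ((xN &&& 1) <<< (N - 1)))) < 2 ^ N :=
      Nat.xor_lt_two_pow hxN hrotlt
    have hBcount : List.countP (fun j => (xN ^^^ ((xN >>> 1) ||| ((xN &&& 1) <<< (N - 1)))).testBit j) (List.range N)
        = List.countP (fun j => t j != t ((j + 1) % N)) (List.range N) := by
      apply List.countP_congr
      intro j hj
      rw [List.mem_range] at hj
      rw [pvRot xN N j hxN (by omega) hj]
    simp only [uniform_pattern_fast_py_alt, if_neg (by omega : ¬ ((N:Int) ≤ 0)), eN, eSL, em]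
    rw [eN1, eB1, eSR, eSL2, PySem.Int.bor_natCast, PySem.Int.bxor_natCast,
      pvPc N _ hylt, hBcount, pvReindex t N (show 0 < N by omega), zero_add]

-- ===== VERDICT (by name: the statement is the Claim_ definition above) =====
theorem uniform_pattern_fast_py_spec : Claim_equal_uniform_pattern_fast_py := by
  intro lbp_value n_neighbors _
  unfold Spec_uniform_pattern_fast_py
  exact pvMain lbp_value n_neighbors
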